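-- pv_equiv track=rewrite | github.com/dbswl701/codingTest | baekjoon/4889.py | isStableStr
-- ===== SOURCE A (Python) =====
-- def isStableStr(str):
--   # str 중에서 {} 있으면 지우기
--   for _ in range(len(str)):
--     str = str.replace('{}', '')
--
--   if len(str) == 0:
--     return 0
--
--   open_count = str.count('{')
--   close_count = str.count('}')
--
--   # 다 같다면, 절반만 바꾸면 된다
--   if open_count == len(str) or close_count == len(str):
--     return len(str)//2
--
--   # 아니라면,
--   else:
--     # 같은거끼리는 절반만 바꾸고,
--     # 다른거끼리는 다 바꾼다
--     diff = abs(open_count - close_count)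
--     answer = diff//2 + len(str)-diff
--     return answer
-- ===== SOURCE B (Python) =====
-- def isStableStr(str):
--     # single pass: cancel matched '{' '}' pairs with a stack, then same count formula
--     stack = []
--     for ch in str:
--         if ch == '}' and stack and stack[-1] == '{':
--             stack.pop()
--         else:
--             stack.append(ch)
--     n = len(stack)
--     if n == 0:
--         return 0
--     open_count = stack.count('{')
--     close_count = stack.count('}')
--     if open_count == n or close_count == n:
--         return n // 2
--     diff = abs(open_count - close_count)
--     return diff // 2 + n - diff
-- ===== Notes on version B (the rewrite author's own statement) =====
-- stated objective: faster
-- what changed: replaces the length-many repeated str.replace('{}','') passes with a single-pass stack that cancels matched '{','}' pairs, then applies the same counting formula to the residue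
import Mathlib
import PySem

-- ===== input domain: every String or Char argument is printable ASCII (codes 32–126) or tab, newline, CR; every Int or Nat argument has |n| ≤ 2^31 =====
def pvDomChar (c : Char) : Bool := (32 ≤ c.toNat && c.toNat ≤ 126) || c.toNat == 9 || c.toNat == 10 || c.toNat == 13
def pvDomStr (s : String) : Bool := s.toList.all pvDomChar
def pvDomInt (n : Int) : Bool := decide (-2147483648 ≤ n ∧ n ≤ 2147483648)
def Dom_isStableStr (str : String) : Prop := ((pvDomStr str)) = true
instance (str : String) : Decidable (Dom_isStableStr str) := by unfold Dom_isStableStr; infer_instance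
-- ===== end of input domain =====

-- B replaces A's quadratic loop of repeated str.replace('{}','') passes by a single-pass
-- stack reduction of matched '{','}' pairs, then applies the same counting formula (faster).


-- ===== PORT A =====
def isStableStr (str : String) : Int :=
  -- for _ in range(len(str)): str = str.replace('{}', '')
  let str := (PySem.List.pyRange 0 (PySem.Str.len str) 1).foldl
      (fun s _ => PySem.Str.replace s "{}" "") str
  if PySem.Str.len str = 0 then 0
  else
    let open_count : Int := PySem.Str.count str "{"
    let close_count : Int := PySem.Str.count str "}"
    if open_count = PySem.Str.len str ∨ close_count = PySem.Str.len str then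
      PySem.Int.floordiv (PySem.Str.len str) 2
    else
      let diff := |open_count - close_count|
      PySem.Int.floordiv diff 2 + PySem.Str.len str - diff

-- ===== PORT B =====
-- the Python stack (append/pop at the end) is kept reversed here: top of stack = head;
-- only its length and element counts are used, which reversal does not affect
def isStableStr_alt (str : String) : Int :=
  let stack := str.toList.foldl
      (fun st ch => if ch = '}' ∧ st.head? = some '{' then st.tail else ch :: st) ([] : List Char)
  let n : Int := stack.length
  if n = 0 then 0
  else
    let open_count : Int := stack.count '{'
    let close_count : Int := stack.count '}'
    if open_count = n ∨ close_count = n then PySem.Int.floordiv n 2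
    else
      let diff := |open_count - close_count|
      PySem.Int.floordiv diff 2 + n - diff

-- ===== PRECONDITION & SPEC =====
def Spec_isStableStr (str : String) (out : Int) : Prop := out = isStableStr_alt str
instance (str : String) (out : Int) : Decidable (Spec_isStableStr str out) := by unfold Spec_isStableStr; infer_instance

-- ===== CLAIM (what is proved, stated in full; the proofs are below) =====
def Claim_equal_isStableStr : Prop := ∀ (str : String), Dom_isStableStr str → Spec_isStableStr str (isStableStr str)

-- ===== LEMMAS AND PROOFS =====

-- one pass of str.replace('{}',''): remove the leftmost-nonoverlapping occurrences of "{}"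
def pvRem : List Char → List Char
  | [] => []
  | [c] => [c]
  | c :: d :: t => if c = '{' ∧ d = '}' then pvRem t else c :: pvRem (d :: t)

-- B's stack step (definitionally the lambda in isStableStr_alt)
def pvStep (st : List Char) (ch : Char) : List Char :=
  if ch = '}' ∧ st.head? = some '{' then st.tail else ch :: st

theorem pvRem_length_le (l : List Char) : (pvRem l).length ≤ l.length := by
  fun_induction pvRem with
  | case1 => simp
  | case2 => simp
  | case3 c d t h ih => simp; omega
  | case4 c d t h ih => simp; simpa using ih

theorem pvRem_eq_or_lt (l : List Char) : pvRem l = l ∨ (pvRem l).length + 2 ≤ l.length := by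
  fun_induction pvRem with
  | case1 => left; rfl
  | case2 => left; rfl
  | case3 c d t h ih =>
    right
    have := pvRem_length_le t
    simp; omega
  | case4 c d t h ih =>
    rcases ih with ih | ih
    · left; simp [ih]
    · right; simp; simpa using ih

theorem pvRem_pair (t : List Char) : pvRem ('{' :: '}' :: t) = pvRem t := by
  simp [pvRem]

theorem pvRem_cons (c d : Char) (t : List Char) (h : ¬(c = '{' ∧ d = '}')) :
    pvRem (c :: d :: t) = c :: pvRem (d :: t) := by
  simp [pvRem, h]

theorem pvRem_occ_lt (u v : List Char) :
    (pvRem (u ++ '{' :: '}' :: v)).length < (u ++ '{' :: '}' :: v).length := by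
  induction u with
  | nil =>
    rw [List.nil_append, pvRem_pair]
    have := pvRem_length_le v
    simp
    omega
  | cons c u ih =>
    rw [List.cons_append]
    cases u with
    | nil =>
      rw [List.nil_append, pvRem_cons c '{' ('}' :: v) (fun h => absurd h.2 (by decide)),
        pvRem_pair]
      have := pvRem_length_le v
      simp
      omega
    | cons d u' =>
      rw [List.cons_append]
      by_cases h : c = '{' ∧ d = '}'
      · obtain ⟨hc, hd⟩ := h
        subst hc; subst hd
        rw [pvRem_pair]
        have := pvRem_length_le (u' ++ '{' :: '}' :: v)
        simp at this ⊢
        omega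
      · rw [pvRem_cons c d _ h]
        have := ih
        rw [List.cons_append] at this
        simp at this ⊢
        omega

theorem foldl_pvStep_pvRem (l : List Char) :
    ∀ st : List Char, (pvRem l).foldl pvStep st = l.foldl pvStep st := by
  fun_induction pvRem with
  | case1 => intro st; rfl
  | case2 => intro st; rfl
  | case3 c d t h ih =>
    intro st
    obtain ⟨hc, hd⟩ := h
    subst hc; subst hd
    have h1 : pvStep st '{' = '{' :: st := by simp [pvStep]
    have h2 : pvStep ('{' :: st) '}' = st := by simp [pvStep]
    simp only [List.foldl_cons, h1, h2]
    exact ih st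
  | case4 c d t h ih =>
    intro st
    simp only [List.foldl_cons]
    exact ih (pvStep st c)

theorem foldl_pvStep_of_fix (t : List Char) :
    ∀ st : List Char, pvRem (st.reverse ++ t) = st.reverse ++ t →
      t.foldl pvStep st = t.reverse ++ st := by
  induction t with
  | nil => intro st _; simp
  | cons c t ih =>
    intro st hfix
    by_cases h : c = '}' ∧ st.head? = some '{'
    · exfalso
      obtain ⟨hc, hh⟩ := h
      cases st with
      | nil => simp at hh
      | cons a st' =>
        have ha : a = '{' := by simpa using hh
        subst ha; subst hc
        have : (('{' :: st').reverse ++ '}' :: t) = st'.reverse ++ '{' :: '}' :: t := by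
          simp
        rw [this] at hfix
        have := pvRem_occ_lt st'.reverse t
        rw [hfix] at this
        omega
    · have hstep : pvStep st c = c :: st := by simp [pvStep, h]
      have harr : (c :: st).reverse ++ t = st.reverse ++ c :: t := by simp
      have := ih (c :: st) (by rw [harr]; exact hfix)
      simp only [List.foldl_cons, hstep, this]
      simp
  -- (cancelling would exhibit a "{}" occurrence, contradicting the fixpoint)

theorem pvRem_iterate_fix_of_fix (k : Nat) (l : List Char) (h : pvRem l = l) :
    pvRem^[k] l = l := by
  induction k with
  | zero => rfl
  | succ k ih => rw [Function.iterate_succ_apply, h, ih]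

theorem pvRem_iterate_fix (k : Nat) :
    ∀ l : List Char, l.length ≤ k → pvRem (pvRem^[k] l) = pvRem^[k] l := by
  induction k with
  | zero =>
    intro l hl
    have : l = [] := List.eq_nil_of_length_eq_zero (Nat.le_zero.mp hl)
    subst this; rfl
  | succ k ih =>
    intro l hl
    rcases pvRem_eq_or_lt l with h | h
    · rw [pvRem_iterate_fix_of_fix _ _ h, h]
    · rw [Function.iterate_succ_apply]
      exact ih (pvRem l) (by omega)

theorem foldl_pvStep_iterate (k : Nat) (l : List Char) :
    (pvRem^[k] l).foldl pvStep [] = l.foldl pvStep [] := by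
  induction k generalizing l with
  | zero => rfl
  | succ k ih =>
    rw [Function.iterate_succ_apply]
    rw [ih (pvRem l), foldl_pvStep_pvRem]

-- the stack result is the reverse of the fully reduced string
theorem foldl_pvStep_eq_reverse (l : List Char) :
    l.foldl pvStep [] = (pvRem^[l.length] l).reverse := by
  have hfix := pvRem_iterate_fix l.length l (le_refl _)
  have := foldl_pvStep_of_fix (pvRem^[l.length] l) [] (by simpa using hfix)
  rw [← foldl_pvStep_iterate l.length l, this, List.append_nil]

-- ---- bridges to the PySem string primitives ----

theorem replace_go_eq (fuel : Nat) :
    ∀ (l acc : List Char), l.length ≤ fuel →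
      PySem.Chars.replace.go ['{', '}'] [] fuel l acc = acc.reverse ++ pvRem l := by
  induction fuel with
  | zero =>
    intro l acc hl
    have : l = [] := List.eq_nil_of_length_eq_zero (Nat.le_zero.mp hl)
    subst this
    simp [PySem.Chars.replace.go, pvRem]
  | succ fuel ih =>
    intro l acc hl
    match l with
    | [] => simp [PySem.Chars.replace.go, pvRem]
    | [c] =>
      have hpre : List.isPrefixOf ['{', '}'] [c] = false := by
        simp [List.isPrefixOf]
      simp only [PySem.Chars.replace.go, hpre, Bool.false_eq_true, if_false]
      rw [ih [] (c :: acc) (by simp)]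
      simp [pvRem]
    | c :: d :: t =>
      by_cases h : c = '{' ∧ d = '}'
      · obtain ⟨hc, hd⟩ := h
        subst hc; subst hd
        have hpre : List.isPrefixOf ['{', '}'] ('{' :: '}' :: t) = true := by
          simp [List.isPrefixOf]
        simp only [PySem.Chars.replace.go, hpre, if_true]
        rw [show List.drop (List.length ['{', '}']) ('{' :: '}' :: t) = t from rfl]
        simp only [List.reverse_nil, List.nil_append]
        rw [ih t acc (by simp at hl; omega)]
        simp [pvRem]
      · have hpre : List.isPrefixOf ['{', '}'] (c :: d :: t) = false := by
          simp only [List.isPrefixOf, Bool.and_true,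
            Bool.and_eq_false_iff, beq_eq_false_iff_ne, ne_eq]
          by_cases hc : c = '{'
          · right; intro hd; exact h ⟨hc, hd.symm⟩
          · left; intro e; exact hc e.symm
        simp only [PySem.Chars.replace.go, hpre, Bool.false_eq_true, if_false]
        rw [ih (d :: t) (c :: acc) (by simp at hl ⊢; omega)]
        simp [pvRem, h]

theorem toList_replace_eq (s : String) :
    (PySem.Str.replace s "{}" "").toList = pvRem s.toList := by
  show (String.ofList (PySem.Chars.replace s.toList "{}".toList "".toList)).toList = _
  have h2 : "{}".toList = ['{', '}'] := by decide
  have h3 : "".toList = [] := by decide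
  rw [h2, h3]
  have : PySem.Chars.replace s.toList ['{', '}'] [] =
      PySem.Chars.replace.go ['{', '}'] [] s.toList.length s.toList [] := by
    simp [PySem.Chars.replace]
  simp only [String.toList_ofList, this]
  rw [replace_go_eq s.toList.length s.toList [] (le_refl _)]
  rfl

theorem count_go_eq (c : Char) (fuel : Nat) :
    ∀ (l : List Char) (acc : Nat), l.length ≤ fuel →
      PySem.Chars.count.go [c] fuel l acc = acc + l.count c := by
  induction fuel with
  | zero =>
    intro l acc hl
    have : l = [] := List.eq_nil_of_length_eq_zero (Nat.le_zero.mp hl)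
    subst this; simp [PySem.Chars.count.go]
  | succ fuel ih =>
    intro l acc hl
    match l with
    | [] => simp [PySem.Chars.count.go]
    | a :: t =>
      by_cases h : a = c
      · subst h
        have hpre : List.isPrefixOf [a] (a :: t) = true := by simp [List.isPrefixOf]
        simp only [PySem.Chars.count.go, hpre, if_true]
        rw [show List.drop (List.length [a]) (a :: t) = t from rfl]
        rw [ih t (acc + 1) (by simp at hl; omega)]
        simp
        omega
      · have hpre : List.isPrefixOf [c] (a :: t) = false := by
          simp [List.isPrefixOf]
          exact fun hh => absurd hh.symm h
        simp only [PySem.Chars.count.go, hpre, Bool.false_eq_true, if_false]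
        rw [ih t acc (by simp at hl; omega)]
        simp [h]

theorem str_count_eq (s : String) (c : Char) :
    PySem.Str.count s (String.ofList [c]) = s.toList.count c := by
  show PySem.Chars.count s.toList (String.ofList [c]).toList = _
  rw [String.toList_ofList]
  simp only [PySem.Chars.count, List.isEmpty_cons, Bool.false_eq_true, if_false]
  rw [count_go_eq c s.toList.length s.toList 0 (le_refl _)]
  simp

theorem foldl_replace_eq (L : List Int) (s : String) :
    (L.foldl (fun s _ => PySem.Str.replace s "{}" "") s).toList = pvRem^[L.length] s.toList := by
  induction L generalizing s with
  | nil => rfl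
  | cons a L ih =>
    simp only [List.foldl_cons, List.length_cons]
    rw [ih (PySem.Str.replace s "{}" ""), toList_replace_eq,
      ← Function.iterate_succ_apply]

-- ===== VERDICT (by name: the statement is the Claim_ definition above) =====
theorem isStableStr_spec : Claim_equal_isStableStr := by
  intro str _
  unfold Spec_isStableStr isStableStr isStableStr_alt
  set l := str.toList with hl
  -- identify A's fully-reduced string
  have hlen : (PySem.List.pyRange 0 (PySem.Str.len str) 1).length = l.length := by
    rw [PySem.List.length_pyRange_one]
    simp [PySem.Str.len, hl]
  have hred : ((PySem.List.pyRange 0 (PySem.Str.len str) 1).foldl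
      (fun s _ => PySem.Str.replace s "{}" "") str).toList = pvRem^[l.length] l := by
    rw [foldl_replace_eq, hlen]
  set t := pvRem^[l.length] l with ht
  -- identify B's stack
  have hstack : l.foldl
      (fun st ch => if ch = '}' ∧ st.head? = some '{' then st.tail else ch :: st) ([] : List Char)
      = t.reverse := by
    have : l.foldl pvStep [] = t.reverse := by rw [foldl_pvStep_eq_reverse]
    simpa [pvStep] using this
  -- rewrite all PySem string primitives on the reduced string to list operations on t
  have hLen : PySem.Str.len ((PySem.List.pyRange 0 (PySem.Str.len str) 1).foldl
      (fun s _ => PySem.Str.replace s "{}" "") str) = (t.length : Int) :=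
    congrArg (fun li : List Char => (li.length : Int)) hred
  have hCntO : PySem.Str.count ((PySem.List.pyRange 0 (PySem.Str.len str) 1).foldl
      (fun s _ => PySem.Str.replace s "{}" "") str) "{" = t.count '{' := by
    have := str_count_eq ((PySem.List.pyRange 0 (PySem.Str.len str) 1).foldl
      (fun s _ => PySem.Str.replace s "{}" "") str) '{'
    rw [show String.ofList ['{'] = "{" by decide] at this
    rw [this, hred]
  have hCntC : PySem.Str.count ((PySem.List.pyRange 0 (PySem.Str.len str) 1).foldl
      (fun s _ => PySem.Str.replace s "{}" "") str) "}" = t.count '}' := by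
    have := str_count_eq ((PySem.List.pyRange 0 (PySem.Str.len str) 1).foldl
      (fun s _ => PySem.Str.replace s "{}" "") str) '}'
    rw [show String.ofList ['}'] = "}" by decide] at this
    rw [this, hred]
  simp only [hstack, hLen, hCntO, hCntC, List.length_reverse, List.count_reverse]
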